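-- pv_equiv track=rewrite | github.com/FiniteStateInc/customer-resources | 06-advanced-integrations-and-demos/yocto-spdx-merge/src/yocto_spdx_merge/enrich.py | _candidate_base_names
-- ===== SOURCE A (Python) =====
-- _KNOWN_SUFFIXES = [
--     "-dev",
--     "-dbg",
--     "-doc",
--     "-staticdev",
--     "-src",
--     "-ptest",
-- ]
--
-- def _candidate_base_names(name: str) -> list[str]:
--     """Generate candidate base package names by progressively stripping suffixes.
--
--     Returns candidates in order of preference (most specific first):
--     1. Known Yocto package suffixes (-dev, -dbg, etc.)
--     2. Iterative dash-stripping from the right (covers sub-packages like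
--        busybox-syslog -> busybox, iptables-module-ebt-802-3 -> iptables-module
--        -> iptables, util-linux-mount -> util-linux, etc.)
--     """
--     candidates: list[str] = []
--
--     # Try stripping known terminal suffixes first
--     for suffix in _KNOWN_SUFFIXES:
--         if name.endswith(suffix):
--             candidates.append(name[: -len(suffix)])
--             break
--
--     # Iteratively strip the last dash-delimited segment
--     current = name
--     while "-" in current:
--         current = current.rsplit("-", 1)[0]
--         candidates.append(current)
--
--     return candidates
-- ===== SOURCE B (Python) =====
-- _KNOWN_SUFFIXES = [
--     "-dev",
--     "-dbg",
--     "-doc",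
--     "-staticdev",
--     "-src",
--     "-ptest",
-- ]
--
-- def _candidate_base_names(name: str) -> list[str]:
--     """Same candidates as the original: one pass collects every dash index,
--     then the original string is sliced at each dash, rightmost first."""
--     candidates: list[str] = []
--     for suffix in _KNOWN_SUFFIXES:
--         if name.endswith(suffix):
--             candidates.append(name[: -len(suffix)])
--             break
--     dash_idxs = [i for i, c in enumerate(name) if c == "-"]
--     for i in reversed(dash_idxs):
--         candidates.append(name[:i])
--     return candidates
-- ===== Notes on version B (the rewrite author's own statement) =====
-- stated objective: simpler
-- what changed: The repeated rsplit-and-chop of a shrinking string is replaced by one enumerate pass that collects all dash indices, then direct slices name[:i] of the original string taken rightmost-first; the known-suffix loop is unchanged.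
import Mathlib
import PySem

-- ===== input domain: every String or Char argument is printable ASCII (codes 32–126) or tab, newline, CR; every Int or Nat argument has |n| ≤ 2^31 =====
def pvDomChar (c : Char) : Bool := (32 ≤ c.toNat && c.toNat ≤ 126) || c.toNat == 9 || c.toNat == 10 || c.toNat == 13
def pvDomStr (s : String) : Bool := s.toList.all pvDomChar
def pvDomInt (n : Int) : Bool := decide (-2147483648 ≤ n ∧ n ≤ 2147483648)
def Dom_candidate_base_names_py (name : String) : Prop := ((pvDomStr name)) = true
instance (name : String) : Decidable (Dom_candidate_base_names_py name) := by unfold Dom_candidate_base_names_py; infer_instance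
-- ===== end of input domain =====

-- B replaces A's repeated rsplit of a shrinking string by one pass collecting dash indices
-- followed by direct slices of the original name (objective: simpler).

-- ===== PORT A =====
-- _KNOWN_SUFFIXES (module constant, used verbatim by both Pythons)
def pvKnownSuffixes : List (List Char) :=
  [['-','d','e','v'], ['-','d','b','g'], ['-','d','o','c'],
   ['-','s','t','a','t','i','c','d','e','v'], ['-','s','r','c'], ['-','p','t','e','s','t']]

-- the 'for suffix in _KNOWN_SUFFIXES: if name.endswith(suffix): append(name[:-len(suffix)]); break'
-- loop, identical line for line in A and in B (B keeps it unchanged)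
def pvSuffixLoop : List (List Char) → List Char → List (List Char)
  | [], _ => []
  | s :: rest, cs =>
      if PySem.Chars.endswith cs s then [PySem.Chars.slice cs none (some (-(s.length : Int)))]
      else pvSuffixLoop rest cs

-- index of the last '-' in cs (valid when '-' ∈ cs): length - 1 - position of first '-' in reverse
def pvLastDash (cs : List Char) : Nat := cs.length - 1 - cs.reverse.findIdx (· = '-')

-- A's while loop; current.rsplit("-", 1)[0] is, when "-" in current, everything before the
-- last '-': hand port, exact on that guard (the only place A calls it)
def pvDashLoopA (cs : List Char) : List (List Char) :=
  if _h : PySem.Chars.isIn ['-'] cs then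
    cs.take (pvLastDash cs) :: pvDashLoopA (cs.take (pvLastDash cs))
  else []
termination_by cs.length
decreasing_by
  have hne : cs ≠ [] := by
    intro hcs; rw [hcs] at _h; exact absurd _h (by decide)
  simp only [List.length_take]
  have : 0 < cs.length := List.length_pos_iff.mpr hne
  unfold pvLastDash
  omega

def candidate_base_names_py (name : String) : List String :=
  let cs := name.toList
  (pvSuffixLoop pvKnownSuffixes cs ++ pvDashLoopA cs).map String.ofList

-- ===== PORT B =====
-- the comprehension '[i for i, c in enumerate(name) if c == "-"]'
def pvDashIdxsFrom (k : Nat) : List Char → List Nat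
  | [] => []
  | c :: rest => if c = '-' then k :: pvDashIdxsFrom (k + 1) rest else pvDashIdxsFrom (k + 1) rest

def candidate_base_names_py_alt (name : String) : List String :=
  let cs := name.toList
  ((pvSuffixLoop pvKnownSuffixes cs ++
      ((pvDashIdxsFrom 0 cs).reverse.map (fun i => cs.take i)))).map String.ofList

-- ===== PRECONDITION & SPEC =====
def Spec_candidate_base_names_py (name : String) (out : List String) : Prop := out = candidate_base_names_py_alt name
instance (name : String) (out : List String) : Decidable (Spec_candidate_base_names_py name out) := by unfold Spec_candidate_base_names_py; infer_instance

-- ===== CLAIM (what is proved, stated in full; the proofs are below) =====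
def Claim_equal_candidate_base_names_py : Prop := ∀ (name : String), Dom_candidate_base_names_py name → Spec_candidate_base_names_py name (candidate_base_names_py name)

-- ===== LEMMAS AND PROOFS =====

lemma pvDashIdxsFrom_no_dash (xs : List Char) (h : '-' ∉ xs) :
    ∀ k, pvDashIdxsFrom k xs = [] := by
  induction xs with
  | nil => intro k; rfl
  | cons c rest ih =>
      intro k
      simp only [List.mem_cons, not_or] at h
      simp [pvDashIdxsFrom, Ne.symm h.1, ih h.2]

lemma pvDashIdxsFrom_append (xs ys : List Char) :
    ∀ k, pvDashIdxsFrom k (xs ++ ys) = pvDashIdxsFrom k xs ++ pvDashIdxsFrom (k + xs.length) ys := by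
  induction xs with
  | nil => intro k; simp [pvDashIdxsFrom]
  | cons c rest ih =>
      intro k
      simp only [List.cons_append, pvDashIdxsFrom, ih (k + 1), List.length_cons]
      split <;> simp [List.cons_append] <;> ring_nf

lemma pvDashIdxsFrom_mem_lt {xs : List Char} {j : ℕ} :
    ∀ k, j ∈ pvDashIdxsFrom k xs → k ≤ j ∧ j < k + xs.length := by
  induction xs with
  | nil => intro k h; simp [pvDashIdxsFrom] at h
  | cons c rest ih =>
      intro k h
      simp only [pvDashIdxsFrom] at h
      split at h
      · rcases List.mem_cons.mp h with rfl | h'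
        · simp
        · have := ih (k + 1) h'; simp only [List.length_cons]; omega
      · have := ih (k + 1) h; simp only [List.length_cons]; omega

lemma pvIsIn_dash_iff (cs : List Char) : PySem.Chars.isIn ['-'] cs = true ↔ '-' ∈ cs := by
  rw [PySem.Chars.isIn_iff_infix]
  constructor
  · intro h; exact h.mem (by simp)
  · intro h
    rcases List.mem_iff_append.mp h with ⟨pre, post, rfl⟩
    exact ⟨pre, post, by simp⟩

lemma pvLastDash_spec (cs : List Char) (h : '-' ∈ cs) :
    ∃ hlt : pvLastDash cs < cs.length,
      cs[pvLastDash cs] = '-' ∧ ∀ m, (hm : m < cs.length) → pvLastDash cs < m → cs[m] ≠ '-' := by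
  have hmemr : '-' ∈ cs.reverse := List.mem_reverse.mpr h
  have hj : cs.reverse.findIdx (· = '-') < cs.reverse.length := by
    apply List.findIdx_lt_length_of_exists; exact ⟨'-', hmemr, by simp⟩
  have hjlen : cs.reverse.findIdx (· = '-') < cs.length := by simpa using hj
  have hi : pvLastDash cs < cs.length := by unfold pvLastDash; omega
  refine ⟨hi, ?_, ?_⟩
  · have hg := List.findIdx_getElem (p := (· = '-')) (xs := cs.reverse) (w := hj)
    rw [List.getElem_reverse] at hg
    have hg' := of_decide_eq_true hg
    unfold pvLastDash
    simpa using hg'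
  · intro m hm hgt hcm
    have hrevlt : cs.length - 1 - m < cs.reverse.findIdx (· = '-') := by
      unfold pvLastDash at hgt; omega
    have hnot := List.not_of_lt_findIdx (p := (· = '-')) (xs := cs.reverse) hrevlt
    rw [List.getElem_reverse] at hnot
    have hix : cs.length - 1 - (cs.length - 1 - m) = m := by omega
    simp only [hix, hcm] at hnot
    simp at hnot

lemma pvDashLoopA_eq : ∀ cs : List Char,
    pvDashLoopA cs = (pvDashIdxsFrom 0 cs).reverse.map (fun i => cs.take i)
  | cs => by
    by_cases h : PySem.Chars.isIn ['-'] cs = true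
    · have hmem : '-' ∈ cs := (pvIsIn_dash_iff cs).mp h
      obtain ⟨hlt, hdash, hafter⟩ := pvLastDash_spec cs hmem
      set i := pvLastDash cs with hidef
      have hnodash : '-' ∉ cs.drop (i + 1) := by
        intro hd
        rcases List.mem_iff_getElem.mp hd with ⟨m, hm, hme⟩
        rw [List.getElem_drop] at hme
        exact hafter (i + 1 + m) (by simp at hm; omega) (by omega) hme
      have hsplit : cs = cs.take i ++ '-' :: cs.drop (i + 1) := by
        conv_lhs => rw [← List.take_append_drop i cs, List.drop_eq_getElem_cons hlt, hdash]
      have htlen : (cs.take i).length = i := by simp; omega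
      have hidx : pvDashIdxsFrom 0 cs
          = pvDashIdxsFrom 0 (cs.take i) ++ [i] := by
        conv_lhs => rw [hsplit]
        rw [pvDashIdxsFrom_append, htlen]
        simp [pvDashIdxsFrom, pvDashIdxsFrom_no_dash _ hnodash]
      have hrec := pvDashLoopA_eq (cs.take i)
      rw [pvDashLoopA, dif_pos h, ← hidef, hrec, hidx]
      simp only [List.reverse_append, List.reverse_cons, List.reverse_nil, List.nil_append,
        List.cons_append, List.map_cons, List.nil_append]
      congr 1
      apply List.map_congr_left
      intro j hj
      have hj' : j < i := by
        have := pvDashIdxsFrom_mem_lt 0 (List.mem_reverse.mp hj)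
        omega
      rw [List.take_take]
      congr 1
      omega
    · rw [pvDashLoopA, dif_neg h]
      have : '-' ∉ cs := fun hm => h ((pvIsIn_dash_iff cs).mpr hm)
      rw [pvDashIdxsFrom_no_dash cs this 0]
      rfl
termination_by cs => cs.length
decreasing_by
  exact (by rw [htlen]; exact hlt : (List.take i cs).length < cs.length)

-- ===== VERDICT (by name: the statement is the Claim_ definition above) =====
theorem candidate_base_names_py_spec : Claim_equal_candidate_base_names_py := by
  intro name _
  show (pvSuffixLoop pvKnownSuffixes name.toList ++ pvDashLoopA name.toList).map String.ofList
      = (pvSuffixLoop pvKnownSuffixes name.toList ++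
          ((pvDashIdxsFrom 0 name.toList).reverse.map (fun i => name.toList.take i))).map String.ofList
  rw [pvDashLoopA_eq]
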